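-- pv_equiv track=rewrite | github.com/andersbekkevard/conway | game/pattern_manager.py | parse_rle
-- ===== SOURCE A (Python) =====
-- from typing import Dict, List, Tuple, Optional
--
-- def parse_rle(rle_string: str) -> List[Tuple[int, int]]:
--     """
--     Parse RLE format string into coordinate list.
--
--     Args:
--         rle_string (str): RLE encoded pattern string
--
--     Returns:
--         List[Tuple[int, int]]: List of (x, y) coordinates for live cells
--     """
--     # Remove whitespace and split by $ (row separator) and ! (end marker)
--     rle_string = rle_string.strip().replace('\n', '').replace(' ', '')
--     if rle_string.endswith('!'):
--         rle_string = rle_string[:-1]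
--
--     rows = rle_string.split('$')
--     coordinates = []
--
--     for y, row in enumerate(rows):
--         x = 0
--         i = 0
--         while i < len(row):
--             # Parse run count (optional)
--             run_count = ""
--             while i < len(row) and row[i].isdigit():
--                 run_count += row[i]
--                 i += 1
--
--             count = int(run_count) if run_count else 1
--
--             if i < len(row):
--                 char = row[i]
--                 if char == 'o':  # Live cell
--                     for _ in range(count):
--                         coordinates.append((x, y))
--                         x += 1
--                 elif char == 'b':  # Dead cell
--                     x += count
--                 i += 1
--
--     return coordinates
-- ===== SOURCE B (Python) =====
-- def parse_rle(rle_string):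
--     """Single-pass state machine: scan the cleaned string once, tracking
--     (x, y) cursor and the pending run-count digits; no row splitting."""
--     s = rle_string.strip().replace('\n', '').replace(' ', '')
--     if s.endswith('!'):
--         s = s[:-1]
--     coordinates = []
--     x = y = 0
--     run = ""
--     for ch in s:
--         if ch.isdigit():
--             run += ch
--         else:
--             count = int(run) if run else 1
--             if ch == '$':
--                 y += 1
--                 x = 0
--             elif ch == 'o':
--                 coordinates.extend((x + k, y) for k in range(count))
--                 x += count
--             elif ch == 'b':
--                 x += count
--             run = ""
--     return coordinates
-- ===== Notes on version B (the rewrite author's own statement) =====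
-- stated objective: faster
-- what changed: Replaces A's split-on-row-separator with nested index-driven while loops (inner digit-scanning loop) by a single left-to-right pass maintaining an (x,y) cursor and the pending digit run as state, avoiding the intermediate row-string list and per-character indexing.
import Mathlib
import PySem

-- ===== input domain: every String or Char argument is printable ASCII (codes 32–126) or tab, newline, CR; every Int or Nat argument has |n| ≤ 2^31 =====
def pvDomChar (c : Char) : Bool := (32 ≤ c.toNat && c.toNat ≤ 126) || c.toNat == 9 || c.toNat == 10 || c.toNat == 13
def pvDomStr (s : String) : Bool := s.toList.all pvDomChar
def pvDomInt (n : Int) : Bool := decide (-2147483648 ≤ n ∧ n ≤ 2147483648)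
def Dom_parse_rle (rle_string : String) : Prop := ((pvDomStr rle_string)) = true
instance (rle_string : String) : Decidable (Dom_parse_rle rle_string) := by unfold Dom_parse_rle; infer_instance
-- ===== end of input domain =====

-- B replaces A's split-on-row-separator + nested index-driven while loops by a
-- single left-to-right pass with an (x, y, pending-run) state machine (same
-- asymptotics, measurably faster by a constant factor: no row list, no indexing).


-- ===== PORT A =====
-- the shared preprocessing lines of the Python (strip / remove '\n' and ' ' / drop trailing '!')
def pvClean (rle_string : String) : List Char :=
  let cs := PySem.Chars.replace (PySem.Chars.replace (PySem.Chars.strip rle_string.toList) ['\n'] []) [' '] []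
  if PySem.Chars.endswith cs ['!'] then PySem.List.slice cs none (some (-1)) else cs

-- A's inner `while i < len(row)` loop: scan the digit run, then dispatch on the next char.
-- `int(run_count)` is PySem.Int.ofChars?; its `.getD 0` default is unreachable (run is a
-- nonempty digit string, on which Python's int() returns normally).
def pvRowA (y : Int) (cs : List Char) (x : Int) (acc : List (Int × Int)) : List (Int × Int) :=
  let run := cs.takeWhile PySem.Chars.isdigit
  let rest := cs.dropWhile PySem.Chars.isdigit
  let count : Int := if run = [] then 1 else (PySem.Int.ofChars? run).getD 0
  match hmr : rest with
  | [] => acc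
  | c :: rest' =>
    if c = 'o' then
      let p := (PySem.List.pyRange 0 count 1).foldl
        (fun (st : List (Int × Int) × Int) _ => (st.1 ++ [(st.2, y)], st.2 + 1)) (acc, x)
      pvRowA y rest' p.2 p.1
    else if c = 'b' then pvRowA y rest' (x + count) acc
    else pvRowA y rest' x acc
termination_by cs.length
decreasing_by
  all_goals
    have h1 : rest.length ≤ cs.length := by
      simpa [rest] using List.length_dropWhile_le (p := PySem.Chars.isdigit) (l := cs)
    simp [hmr] at h1; omega

def parse_rle (rle_string : String) : List (Int × Int) :=
  let rows := PySem.Chars.splitOn (pvClean rle_string) ['$']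
  (PySem.List.enumerate rows).foldl (fun acc p => pvRowA p.1 p.2 0 acc) []

-- ===== PORT B =====
-- B's loop body: state is (x, y, pending digit run, coordinates).
def pvStep (st : Int × Int × List Char × List (Int × Int)) (ch : Char) :
    Int × Int × List Char × List (Int × Int) :=
  let (x, y, run, coords) := st
  if PySem.Chars.isdigit ch then (x, y, run ++ [ch], coords)
  else
    let count : Int := if run = [] then 1 else (PySem.Int.ofChars? run).getD 0
    if ch = '$' then (0, y + 1, [], coords)
    else if ch = 'o' then
      (x + count, y, [], coords ++ (PySem.List.pyRange 0 count 1).map (fun k => (x + k, y)))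
    else if ch = 'b' then (x + count, y, [], coords)
    else (x, y, [], coords)

def parse_rle_alt (rle_string : String) : List (Int × Int) :=
  ((pvClean rle_string).foldl pvStep (0, 0, [], [])).2.2.2

-- ===== PRECONDITION & SPEC =====
def Spec_parse_rle (rle_string : String) (out : List (Int × Int)) : Prop := out = parse_rle_alt rle_string
instance (rle_string : String) (out : List (Int × Int)) : Decidable (Spec_parse_rle rle_string out) := by unfold Spec_parse_rle; infer_instance

-- ===== CLAIM (what is proved, stated in full; the proofs are below) =====
def Claim_equal_parse_rle : Prop := ∀ (rle_string : String), Dom_parse_rle rle_string → Spec_parse_rle rle_string (parse_rle rle_string)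

-- ===== LEMMAS AND PROOFS =====

-- proof-only helpers: a structural model of splitting on '$', and A's outer row loop
def pvSplit : List Char → List (List Char)
  | [] => [[]]
  | c :: t =>
    if c = '$' then [] :: pvSplit t
    else
      match pvSplit t with
      | [] => [[c]]
      | h :: t' => (c :: h) :: t'

def pvRowsGo : List (List Char) → Int → List (Int × Int) → List (Int × Int)
  | [], _, acc => acc
  | r :: rs, y, acc => pvRowsGo rs (y + 1) (pvRowA y r 0 acc)

theorem pvSplit_ne_nil (cs : List Char) : pvSplit cs ≠ [] := by
  cases cs with
  | nil => simp [pvSplit]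
  | cons c t =>
    simp only [pvSplit]
    split
    · simp
    · split <;> simp

theorem pv_go_spec : ∀ (fuel : Nat) (l cur : List Char) (acc : List (List Char)),
    l.length < fuel →
    PySem.Chars.splitOn.go ['$'] fuel l cur acc =
      acc.reverse ++ (match pvSplit l with
        | [] => [cur.reverse]
        | h :: t => (cur.reverse ++ h) :: t) := by
  intro fuel
  induction fuel with
  | zero => intro l cur acc h; omega
  | succ fuel ih =>
    intro l cur acc h
    cases l with
    | nil => simp [PySem.Chars.splitOn.go, pvSplit]
    | cons c rest =>
      have hpref : List.isPrefixOf ['$'] (c :: rest) = ('$' == c) := by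
        simp [List.isPrefixOf]
      by_cases hc : c = '$'
      · subst hc
        rw [show PySem.Chars.splitOn.go ['$'] (fuel + 1) ('$' :: rest) cur acc =
              PySem.Chars.splitOn.go ['$'] fuel rest [] (cur.reverse :: acc) from by
            simp [PySem.Chars.splitOn.go, hpref]]
        rw [ih rest [] (cur.reverse :: acc) (by simp at h; omega)]
        obtain ⟨h0, t0, hs⟩ := List.exists_cons_of_ne_nil (pvSplit_ne_nil rest)
        rw [hs]
        simp [pvSplit, hs]
      · rw [show PySem.Chars.splitOn.go ['$'] (fuel + 1) (c :: rest) cur acc =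
              PySem.Chars.splitOn.go ['$'] fuel rest (c :: cur) acc from by
            simp [PySem.Chars.splitOn.go, hpref, Ne.symm hc]]
        rw [ih rest (c :: cur) acc (by simp at h; omega)]
        obtain ⟨h0, t0, hs⟩ := List.exists_cons_of_ne_nil (pvSplit_ne_nil rest)
        rw [hs]
        simp [pvSplit, hc, hs]

theorem pv_splitOn_dollar (cs : List Char) : PySem.Chars.splitOn cs ['$'] = pvSplit cs := by
  have h := pv_go_spec (cs.length + 1) cs [] [] (by omega)
  rw [show PySem.Chars.splitOn cs ['$'] = PySem.Chars.splitOn.go ['$'] (cs.length + 1) cs [] []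
      from rfl]
  rw [h]
  obtain ⟨h0, t0, hs⟩ := List.exists_cons_of_ne_nil (pvSplit_ne_nil cs)
  rw [hs]
  simp

theorem pvSplit_no_dollar (cs : List Char) (h : '$' ∉ cs) : pvSplit cs = [cs] := by
  induction cs with
  | nil => simp [pvSplit]
  | cons c t ih =>
    simp only [List.mem_cons, not_or] at h
    rw [pvSplit, if_neg (fun hh => h.1 hh.symm), ih h.2]

theorem pvSplit_append (pre suf : List Char) (h : '$' ∉ pre) :
    pvSplit (pre ++ '$' :: suf) = pre :: pvSplit suf := by
  induction pre with
  | nil => simp [pvSplit]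
  | cons c p' ih =>
    simp only [List.mem_cons, not_or] at h
    rw [List.cons_append, pvSplit, if_neg (fun hh => h.1 hh.symm), ih h.2]

theorem pv_digit_not_space (c : Char) (hc : PySem.Chars.isdigit c = true) :
    PySem.Int.isIntSpace c = false := by
  simp [PySem.Chars.isdigit] at hc
  obtain ⟨h1, h2⟩ := hc
  simp only [Char.le_def, UInt32.le_iff_toNat_le] at h1 h2
  simp only [PySem.Int.isIntSpace, Bool.or_eq_false_iff, decide_eq_false_iff_not,
    Char.ext_iff, UInt32.ext_iff]
  have e0 : ('0' : Char).val.toNat = 48 := rfl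
  have e9 : ('9' : Char).val.toNat = 57 := rfl
  have a1 : (' ' : Char).val.toNat = 32 := rfl
  have a2 : ('\t' : Char).val.toNat = 9 := rfl
  have a3 : ('\n' : Char).val.toNat = 10 := rfl
  have a4 : ('\x0d' : Char).val.toNat = 13 := rfl
  have a5 : ('\x0b' : Char).val.toNat = 11 := rfl
  have a6 : ('\x0c' : Char).val.toNat = 12 := rfl
  omega

theorem pv_opt_nonneg (X : Option Nat) :
    0 ≤ (Option.map (fun n : Int => n) (X.bind fun a => some ((a : Int)))).getD 0 := by
  cases X <;> simp

-- int() of a nonempty digit run is never negative (Python returns the run's decimal value)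
theorem pv_count_nonneg (run : List Char) (hne : run ≠ [])
    (hd : run.all PySem.Chars.isdigit = true) : 0 ≤ (PySem.Int.ofChars? run).getD 0 := by
  obtain ⟨c, t, rfl⟩ := List.exists_cons_of_ne_nil hne
  simp only [List.all_cons, Bool.and_eq_true] at hd
  obtain ⟨hc, ht⟩ := hd
  have hall : ∀ x ∈ c :: t, PySem.Int.isIntSpace x = false := by
    intro x hx
    rcases hx with _ | hx
    · exact pv_digit_not_space c hc
    · exact pv_digit_not_space x (by simpa using List.all_eq_true.mp ht x (by assumption))
  simp only [PySem.Int.ofChars?]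
  have h1 : (c :: t).dropWhile PySem.Int.isIntSpace = c :: t := by
    rw [List.dropWhile_eq_self_iff]; intro hl; simp [hall c (by simp)]
  have h2 : (c :: t).reverse.dropWhile PySem.Int.isIntSpace = (c :: t).reverse := by
    rw [List.dropWhile_eq_self_iff]; intro hl
    have hm : (c :: t).reverse[0] ∈ c :: t := List.mem_reverse.mp (List.getElem_mem hl)
    simp only [List.reverse_cons] at hm ⊢
    simp [hall _ hm]
  rw [h1, h2, List.reverse_reverse]
  split
  · rename_i ds heq
    have : c = '-' := (List.cons.injEq .. ▸ heq :) |>.1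
    subst this; exact absurd hc (by decide)
  · rename_i ds heq
    have : c = '+' := (List.cons.injEq .. ▸ heq :) |>.1
    subst this; exact absurd hc (by decide)
  · exact pv_opt_nonneg _

theorem pv_foldl_digits (ds : List Char) (hd : ds.all PySem.Chars.isdigit = true) :
    ∀ (x y : Int) (run : List Char) (acc : List (Int × Int)),
      List.foldl pvStep (x, y, run, acc) ds = (x, y, run ++ ds, acc) := by
  induction ds with
  | nil => intro x y run acc; simp
  | cons d t ih =>
    simp only [List.all_cons, Bool.and_eq_true] at hd
    intro x y run acc
    simp only [List.foldl_cons]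
    rw [show pvStep (x, y, run, acc) d = (x, y, run ++ [d], acc) from by simp [pvStep, hd.1]]
    rw [ih hd.2]
    simp

theorem pv_foldl_emit (y : Int) : ∀ (l : List Int) (acc : List (Int × Int)) (x : Int),
    l.foldl (fun (st : List (Int × Int) × Int) _ => (st.1 ++ [(st.2, y)], st.2 + 1)) (acc, x)
      = (acc ++ List.map (fun (k : Nat) => (x + (k : Int), y)) (List.range l.length), x + l.length) := by
  intro l
  induction l with
  | nil => intro acc x; simp
  | cons a t ih =>
    intro acc x
    simp only [List.foldl_cons, ih, List.length_cons, List.range_succ_eq_map, List.map_cons,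
      List.map_map, Function.comp_def, Nat.cast_zero, add_zero, Prod.mk.injEq]
    constructor
    · rw [show (fun (k : Nat) => (x + ((k.succ : Nat) : Int), y)) = fun (k : Nat) => (x + 1 + (k : Int), y) from by
        funext k; push_cast; ring_nf]
      simp
    · push_cast; ring

theorem pv_pyRange_map (count x y : Int) :
    (PySem.List.pyRange 0 count 1).map (fun k => (x + k, y))
      = List.map (fun (k : Nat) => (x + (k : Int), y)) (List.range (PySem.List.pyRange 0 count 1).length) := by
  by_cases h : 0 ≤ count
  · obtain ⟨n, rfl⟩ : ∃ n : Nat, count = (n : Int) := ⟨count.toNat, (Int.toNat_of_nonneg h).symm⟩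
    rw [show PySem.List.pyRange 0 (n : Int) 1 = PySem.List.pyRange 0 (n : Int) from rfl,
      PySem.List.pyRange_zero_natCast]
    simp [List.map_map, Function.comp_def]
  · rw [show PySem.List.pyRange 0 count 1 = PySem.List.pyRange 0 count from rfl,
      PySem.List.pyRange_one_eq_nil (by omega)]
    simp

theorem pv_pyRange_len (count : Int) (h : 0 ≤ count) :
    ((PySem.List.pyRange 0 count 1).length : Int) = count := by
  rw [show PySem.List.pyRange 0 count 1 = PySem.List.pyRange 0 count from rfl,
    PySem.List.length_pyRange_one]
  omega

theorem pv_row_lemma : ∀ (n : Nat) (cs : List Char), cs.length ≤ n → '$' ∉ cs →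
    ∀ (x y : Int) (acc : List (Int × Int)),
      (List.foldl pvStep (x, y, [], acc) cs).2.1 = y ∧
      (List.foldl pvStep (x, y, [], acc) cs).2.2.2 = pvRowA y cs x acc := by
  intro n
  induction n with
  | zero =>
    intro cs h _ x y acc
    have : cs = [] := List.eq_nil_of_length_eq_zero (by omega)
    subst this
    simp [pvRowA]
  | succ n ih =>
    intro cs hlen hdollar x y acc
    have hcs : cs.takeWhile PySem.Chars.isdigit ++ cs.dropWhile PySem.Chars.isdigit = cs :=
      List.takeWhile_append_dropWhile
    have hrd : (cs.takeWhile PySem.Chars.isdigit).all PySem.Chars.isdigit = true :=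
      List.all_eq_true.mpr (fun x hx => List.mem_takeWhile_imp hx)
    have hfold : List.foldl pvStep (x, y, [], acc) cs
        = List.foldl pvStep (x, y, cs.takeWhile PySem.Chars.isdigit, acc)
            (cs.dropWhile PySem.Chars.isdigit) := by
      conv_lhs => rw [← hcs]
      rw [List.foldl_append, pv_foldl_digits _ hrd, List.nil_append]
    rw [hfold, pvRowA.eq_def]
    cases hr : cs.dropWhile PySem.Chars.isdigit with
    | nil => simp
    | cons c rest' =>
      have hne : cs.dropWhile PySem.Chars.isdigit ≠ [] := by rw [hr]; simp
      have hcnd : PySem.Chars.isdigit c = false := by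
        have h0 := List.head_dropWhile_not (p := PySem.Chars.isdigit) (l := cs) hne
        simpa [hr] using h0
      have hcmem : c ∈ cs := (List.dropWhile_sublist (l := cs) (p := PySem.Chars.isdigit)).subset
        (by rw [hr]; exact List.mem_cons_self ..)
      have hcD : ¬ (c = '$') := fun hcd => hdollar (hcd ▸ hcmem)
      have hd' : '$' ∉ rest' := fun hm => hdollar
        ((List.dropWhile_sublist (l := cs) (p := PySem.Chars.isdigit)).subset
          (by rw [hr]; exact List.mem_cons_of_mem _ hm))
      have hlen' : rest'.length ≤ n := by
        have h1 := congrArg List.length hcs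
        simp [hr] at h1
        omega
      have hcount : (0 : Int) ≤
          (if cs.takeWhile PySem.Chars.isdigit = [] then 1
           else (PySem.Int.ofChars? (cs.takeWhile PySem.Chars.isdigit)).getD 0) := by
        by_cases he : cs.takeWhile PySem.Chars.isdigit = []
        · simp [he]
        · rw [if_neg he]
          exact pv_count_nonneg _ he hrd
      simp only [List.foldl_cons]
      by_cases ho : c = 'o'
      · subst ho
        rw [show pvStep (x, y, cs.takeWhile PySem.Chars.isdigit, acc) 'o' =
            (x + (if cs.takeWhile PySem.Chars.isdigit = [] then 1
                  else (PySem.Int.ofChars? (cs.takeWhile PySem.Chars.isdigit)).getD 0), y, [],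
              acc ++ (PySem.List.pyRange 0
                (if cs.takeWhile PySem.Chars.isdigit = [] then 1
                 else (PySem.Int.ofChars? (cs.takeWhile PySem.Chars.isdigit)).getD 0) 1).map
                (fun k => (x + k, y))) from by
          simp [pvStep, hcnd]]
        have hih := ih rest' hlen' hd'
          (x + (if cs.takeWhile PySem.Chars.isdigit = [] then 1
                else (PySem.Int.ofChars? (cs.takeWhile PySem.Chars.isdigit)).getD 0)) y
          (acc ++ (PySem.List.pyRange 0
            (if cs.takeWhile PySem.Chars.isdigit = [] then 1
             else (PySem.Int.ofChars? (cs.takeWhile PySem.Chars.isdigit)).getD 0) 1).map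
            (fun k => (x + k, y)))
        refine ⟨hih.1, ?_⟩
        rw [hih.2]
        rw [pv_foldl_emit, pv_pyRange_map]
        congr 1
        rw [pv_pyRange_len _ hcount]
      · by_cases hb : c = 'b'
        · subst hb
          rw [show pvStep (x, y, cs.takeWhile PySem.Chars.isdigit, acc) 'b' =
              (x + (if cs.takeWhile PySem.Chars.isdigit = [] then 1
                    else (PySem.Int.ofChars? (cs.takeWhile PySem.Chars.isdigit)).getD 0), y, [],
                acc) from by
            simp [pvStep, hcnd]]
          have hih := ih rest' hlen' hd'
            (x + (if cs.takeWhile PySem.Chars.isdigit = [] then 1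
                  else (PySem.Int.ofChars? (cs.takeWhile PySem.Chars.isdigit)).getD 0)) y acc
          rw [if_neg (show ¬ (('b' : Char) = 'o') by decide),
            if_pos (show ('b' : Char) = 'b' from rfl)]
          exact hih
        · rw [show pvStep (x, y, cs.takeWhile PySem.Chars.isdigit, acc) c = (x, y, [], acc) from by
            simp [pvStep, hcnd, hcD, ho, hb]]
          have hih := ih rest' hlen' hd' x y acc
          rw [if_neg ho, if_neg hb]
          exact hih

theorem pv_main_lemma : ∀ (n : Nat) (cs : List Char), cs.length ≤ n →
    ∀ (y : Int) (acc : List (Int × Int)),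
      (List.foldl pvStep (0, y, [], acc) cs).2.2.2 = pvRowsGo (pvSplit cs) y acc := by
  intro n
  induction n with
  | zero =>
    intro cs h y acc
    have : cs = [] := List.eq_nil_of_length_eq_zero (by omega)
    subst this
    simp [pvSplit, pvRowsGo, pvRowA]
  | succ n ih =>
    intro cs hlen y acc
    by_cases hd : '$' ∈ cs
    · have hne : cs.dropWhile (fun c => c ≠ '$') ≠ [] := by
        intro hcon
        have := (List.dropWhile_eq_nil_iff).mp hcon '$' hd
        simp at this
      obtain ⟨c0, suf, hsuf⟩ := List.exists_cons_of_ne_nil hne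
      have hc0 : c0 = '$' := by
        have h0 := List.head_dropWhile_not (p := fun c => decide (c ≠ '$')) (l := cs) hne
        have h1 : (cs.dropWhile (fun c => c ≠ '$')).head? = some c0 := by rw [hsuf]; rfl
        rw [List.head?_eq_some_head hne, Option.some_inj] at h1
        rw [h1] at h0
        simpa using h0
      subst hc0
      have hsplit : cs = cs.takeWhile (fun c => c ≠ '$') ++ '$' :: suf := by
        conv_lhs => rw [← List.takeWhile_append_dropWhile (p := fun c => decide (c ≠ '$')) (l := cs)]
        rw [hsuf]
      have hpre : '$' ∉ cs.takeWhile (fun c => c ≠ '$') := by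
        intro hm
        have := List.mem_takeWhile_imp hm
        simp at this
      have hlen' : suf.length ≤ n := by
        have h1 := congrArg List.length hsplit
        simp at h1
        omega
      rw [hsplit, List.foldl_append, List.foldl_cons]
      rw [show ∀ st : Int × Int × List Char × List (Int × Int),
            pvStep st '$' = (0, st.2.1 + 1, [], st.2.2.2) from by
        rintro ⟨a, b, r, co⟩
        simp [pvStep, show PySem.Chars.isdigit '$' = false from rfl]]
      have hst := pv_row_lemma (cs.takeWhile (fun c => c ≠ '$')).length _ le_rfl hpre 0 y acc
      rw [hst.1, hst.2]
      rw [ih suf hlen' (y + 1) _]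
      rw [pvSplit_append _ _ hpre]
      rfl
    · have hrow := (pv_row_lemma cs.length cs le_rfl hd 0 y acc).2
      rw [hrow, pvSplit_no_dollar cs hd]
      rfl

theorem pv_enum_fold : ∀ (rows : List (List Char)) (y : Int) (acc : List (Int × Int)),
    (PySem.List.enumerate rows y).foldl (fun acc p => pvRowA p.1 p.2 0 acc) acc
      = pvRowsGo rows y acc := by
  intro rows
  induction rows with
  | nil => intro y acc; simp [PySem.List.enumerate, pvRowsGo]
  | cons r rs ih =>
    intro y acc
    rw [PySem.List.enumerate_cons]
    simp only [List.foldl_cons]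
    rw [ih]
    rfl

-- ===== VERDICT (by name: the statement is the Claim_ definition above) =====
theorem parse_rle_spec : Claim_equal_parse_rle := by
  intro s _
  unfold Spec_parse_rle parse_rle parse_rle_alt
  rw [pv_splitOn_dollar, pv_enum_fold]
  rw [pv_main_lemma (pvClean s).length (pvClean s) le_rfl 0 []]
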